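-- pv_equiv track=rewrite | github.com/wrench1997/rjcut | subtitle_effects.py | _build_display_text_and_map
-- ===== SOURCE A (Python) =====
-- from typing import List, Dict, Optional
--
-- def _split_words_for_display(words: List[dict], max_chars: int = 12) -> List[List[dict]]:
--     """
--     用于显示层的自动换行：
--       - 优先按标点断
--       - 单行不超过 max_chars
--       - 返回二维数组，每个子列表是一行
--     """
--     if not words:
--         return []
--
--     major_breaks = set("。！？；!?;")
--     minor_breaks = set("，、：,.，:")
--     all_breaks = major_breaks | minor_breaks
--
--     lines: List[List[dict]] = []
--     cur_line: List[dict] = []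
--     cur_len = 0
--
--     for w in words:
--         txt = w.get("text", "")
--         wlen = len(txt)
--
--         if cur_line and cur_len + wlen > max_chars:
--             lines.append(cur_line)
--             cur_line = []
--             cur_len = 0
--
--         cur_line.append(w)
--         cur_len += wlen
--
--         # 句号类优先换行
--         if txt and txt[-1] in major_breaks:
--             lines.append(cur_line)
--             cur_line = []
--             cur_len = 0
--         # 逗号类：若当前行已接近满，也换
--         elif txt and txt[-1] in minor_breaks and cur_len >= max_chars - 2:
--             lines.append(cur_line)
--             cur_line = []
--             cur_len = 0
--
--     if cur_line:
--         lines.append(cur_line)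
--
--     return lines
--
-- def _build_display_text_and_map(words: List[dict], max_chars: int = 12):
--     """
--     根据 words 构造 display_text（带 \\N），并返回：
--       - display_text: 用于 ASS 显示的文本
--       - word_positions: 每个 word 在 display_text 中的起始位置
--     """
--     lines = _split_words_for_display(words, max_chars=max_chars)
--
--     display_parts = []
--     word_positions = []
--     pos = 0
--     word_idx = 0
--
--     for li, line in enumerate(lines):
--         for w in line:
--             word_positions.append(pos)
--             txt = w.get("text", "")
--             display_parts.append(txt)
--             pos += len(txt)
--             word_idx += 1
--
--         if li < len(lines) - 1:
--             display_parts.append(r"\N")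
--             pos += 2  # "\N" 作为两个字符计入显示位置
--
--     display_text = "".join(display_parts)
--     return display_text, word_positions
-- ===== SOURCE B (Python) =====
-- def _build_display_text_and_map(words, max_chars=12):
--     """Single fused pass: builds display_text and word_positions directly,
--     without the intermediate list-of-lines."""
--     major_breaks = set("。！？；!?;")
--     minor_breaks = set("，、：,.，:")
--
--     parts = []
--     positions = []
--     pos = 0
--     cur_len = 0
--     line_nonempty = False   # current display line has at least one word
--     pending = False         # a punctuation break ended the previous line
--
--     for w in words:
--         txt = w.get("text", "")
--         wlen = len(txt)
--         if pending or (line_nonempty and cur_len + wlen > max_chars):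
--             parts.append(r"\N")
--             pos += 2
--             cur_len = 0
--             line_nonempty = False
--         positions.append(pos)
--         parts.append(txt)
--         pos += wlen
--         cur_len += wlen
--         line_nonempty = True
--         if txt and txt[-1] in major_breaks:
--             pending, cur_len, line_nonempty = True, 0, False
--         elif txt and txt[-1] in minor_breaks and cur_len >= max_chars - 2:
--             pending, cur_len, line_nonempty = True, 0, False
--         else:
--             pending = False
--
--     return "".join(parts), positions
-- ===== Notes on version B (the rewrite author's own statement) =====
-- stated objective: simpler
-- what changed: B fuses A's two passes (split words into a list of lines, then walk the lines with an index to emit text, separators and positions) into a single pass over the words that maintains a pending-break flag and emits '\N' lazily before the next word, eliminating the intermediate list-of-lines.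
import Mathlib
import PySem

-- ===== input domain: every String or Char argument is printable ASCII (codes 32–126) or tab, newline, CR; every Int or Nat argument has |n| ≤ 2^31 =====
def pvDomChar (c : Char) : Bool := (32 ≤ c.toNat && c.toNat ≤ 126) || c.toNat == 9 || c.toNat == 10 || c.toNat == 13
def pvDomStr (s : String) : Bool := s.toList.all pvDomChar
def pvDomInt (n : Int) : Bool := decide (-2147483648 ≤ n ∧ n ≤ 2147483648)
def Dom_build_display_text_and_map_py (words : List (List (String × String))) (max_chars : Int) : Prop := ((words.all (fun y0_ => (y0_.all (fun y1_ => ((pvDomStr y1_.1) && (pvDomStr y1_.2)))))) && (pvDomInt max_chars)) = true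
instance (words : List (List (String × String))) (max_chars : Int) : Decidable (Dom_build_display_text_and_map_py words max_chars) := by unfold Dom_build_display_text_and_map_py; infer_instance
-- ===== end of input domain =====

-- B fuses A's two passes (line splitting, then text/position building) into one pass
-- that maintains a pending-break flag; objective: simpler (no intermediate list of lines).

-- ===== PORT A =====
-- w.get("text", "") on the association-list encoding of the dict (first match)
def pvGetText (w : List (String × String)) : String :=
  match w with
  | [] => ""
  | (k, v) :: rest => if k = "text" then v else pvGetText rest

def pvMajorBreaks : List Char := "。！？；!?;".toList
def pvMinorBreaks : List Char := "，、：,.，:".toList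

-- 'txt and txt[-1] in s'  (txt[-1] via PySem.Str.pyGet?; empty string → False)
def pvLastIn (txt : String) (s : List Char) : Bool :=
  match PySem.Str.pyGet? txt (-1) with
  | some c => s.contains c
  | none => false

-- one iteration of the loop body of _split_words_for_display
def pvStepA (max_chars : Int)
    (st : List (List (List (String × String))) × List (List (String × String)) × Int)
    (w : List (String × String)) :
    List (List (List (String × String))) × List (List (String × String)) × Int :=
  let (lines, cur_line, cur_len) := st
  let txt := pvGetText w
  let wlen := PySem.Str.len txt
  let (lines, cur_line, cur_len) :=
    if cur_line ≠ [] ∧ cur_len + wlen > max_chars then (lines ++ [cur_line], [], 0)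
    else (lines, cur_line, cur_len)
  let cur_line := cur_line ++ [w]
  let cur_len := cur_len + wlen
  if pvLastIn txt pvMajorBreaks then (lines ++ [cur_line], [], 0)
  else if pvLastIn txt pvMinorBreaks ∧ cur_len ≥ max_chars - 2 then (lines ++ [cur_line], [], 0)
  else (lines, cur_line, cur_len)

-- _split_words_for_display
def pvSplitWordsForDisplay (words : List (List (String × String))) (max_chars : Int) :
    List (List (List (String × String))) :=
  if words = [] then []
  else
    let st := words.foldl (pvStepA max_chars) ([], [], 0)
    let (lines, cur_line, _) := st
    if cur_line ≠ [] then lines ++ [cur_line] else lines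

-- inner loop body of the second pass: one word
def pvEmitWord (st : List String × List Int × Int) (w : List (String × String)) :
    List String × List Int × Int :=
  let (parts, positions, pos) := st
  let txt := pvGetText w
  (parts ++ [txt], positions ++ [pos], pos + PySem.Str.len txt)

-- the 'for li, line in enumerate(lines)' loop, with n = len(lines) and li the index
def pvPhase2 (n : Int) : Int → List (List (List (String × String))) →
    List String × List Int × Int → List String × List Int × Int
  | _, [], st => st
  | li, line :: rest, st =>
    let st := line.foldl pvEmitWord st
    let st := if li < n - 1 then (st.1 ++ ["\\N"], st.2.1, st.2.2 + 2) else st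
    pvPhase2 n (li + 1) rest st

def build_display_text_and_map_py (words : List (List (String × String))) (max_chars : Int) :
    String × List Int :=
  let lines := pvSplitWordsForDisplay words max_chars
  let st := pvPhase2 (PySem.List.len lines) 0 lines ([], [], 0)
  (PySem.Str.join "" st.1, st.2.1)

-- ===== PORT B =====
-- state: (parts, positions, pos, cur_len, line_nonempty, pending)
def pvStepB (max_chars : Int)
    (st : List String × List Int × Int × Int × Bool × Bool)
    (w : List (String × String)) :
    List String × List Int × Int × Int × Bool × Bool :=
  let (parts, positions, pos, cur_len, line_nonempty, pending) := st
  let txt := pvGetText w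
  let wlen := PySem.Str.len txt
  let (parts, pos, cur_len, line_nonempty) :=
    if pending || (line_nonempty && decide (cur_len + wlen > max_chars)) then
      (parts ++ ["\\N"], pos + 2, (0 : Int), false)
    else (parts, pos, cur_len, line_nonempty)
  let positions := positions ++ [pos]
  let parts := parts ++ [txt]
  let pos := pos + wlen
  let cur_len := cur_len + wlen
  if pvLastIn txt pvMajorBreaks then (parts, positions, pos, 0, false, true)
  else if pvLastIn txt pvMinorBreaks && decide (cur_len ≥ max_chars - 2) then
    (parts, positions, pos, 0, false, true)
  else (parts, positions, pos, cur_len, true, false)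

def build_display_text_and_map_py_alt (words : List (List (String × String))) (max_chars : Int) :
    String × List Int :=
  let st := words.foldl (pvStepB max_chars) ([], [], 0, 0, false, false)
  (PySem.Str.join "" st.1, st.2.1)

-- ===== PRECONDITION & SPEC =====
def Spec_build_display_text_and_map_py (words : List (List (String × String))) (max_chars : Int) (out : String × List Int) : Prop := out = build_display_text_and_map_py_alt words max_chars
instance (words : List (List (String × String))) (max_chars : Int) (out : String × List Int) : Decidable (Spec_build_display_text_and_map_py words max_chars out) := by unfold Spec_build_display_text_and_map_py; infer_instance

-- ===== CLAIM (what is proved, stated in full; the proofs are below) =====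
def Claim_equal_build_display_text_and_map_py : Prop := ∀ (words : List (List (String × String))) (max_chars : Int), Dom_build_display_text_and_map_py words max_chars → Spec_build_display_text_and_map_py words max_chars (build_display_text_and_map_py words max_chars)

-- ===== LEMMAS AND PROOFS =====

-- rendering a list of lines: '\N'-separator before every line except the first
def pvEmitSep (st : List String × List Int × Int) : List String × List Int × Int :=
  (st.1 ++ ["\\N"], st.2.1, st.2.2 + 2)

def pvEmitLine (st : List String × List Int × Int) (l : List (List (String × String))) :
    List String × List Int × Int :=
  l.foldl pvEmitWord st

def pvRenderTail (st : List String × List Int × Int)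
    (L : List (List (List (String × String)))) : List String × List Int × Int :=
  match L with
  | [] => st
  | l :: ls => ls.foldl (fun s l' => pvEmitLine (pvEmitSep s) l') (pvEmitLine st l)

def pvRender (L : List (List (List (String × String)))) : List String × List Int × Int :=
  pvRenderTail ([], [], 0) L

-- abstraction: the B-state corresponding to A's split state
def pvMkB (st : List (List (List (String × String))) × List (List (String × String)) × Int) :
    List String × List Int × Int × Int × Bool × Bool :=
  let (lines, cur, clen) := st
  let t := pvRender (lines ++ (if cur = [] then [] else [cur]))
  (t.1, t.2.1, t.2.2, clen, !cur.isEmpty, cur.isEmpty && !lines.isEmpty)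

lemma pvRender_snoc (L : List (List (List (String × String)))) (c : List (List (String × String))) :
    pvRender (L ++ [c]) =
      if L = [] then pvEmitLine ([], [], 0) c else pvEmitLine (pvEmitSep (pvRender L)) c := by
  cases L with
  | nil => simp [pvRender, pvRenderTail]
  | cons l ls => simp [pvRender, pvRenderTail, List.foldl_append]

lemma pvRender_snoc_word (L : List (List (List (String × String))))
    (c : List (List (String × String))) (w : List (String × String)) :
    pvRender (L ++ [c ++ [w]]) = pvEmitWord (pvRender (L ++ [c])) w := by
  rw [pvRender_snoc, pvRender_snoc]
  by_cases h : L = [] <;> simp [h, pvEmitLine, List.foldl_append]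

-- appending a word to the open line, no break
lemma pvTriple_emit (lines : List (List (List (String × String))))
    (cur : List (List (String × String))) (w : List (String × String))
    (h : cur ≠ [] ∨ lines = []) :
    pvEmitWord (pvRender (lines ++ if cur = [] then [] else [cur])) w =
      pvRender (lines ++ [cur ++ [w]]) := by
  by_cases hcur : cur = []
  · rcases h with h | h
    · exact absurd hcur h
    · subst h hcur
      simp [pvRender, pvRenderTail, pvEmitLine]
  · rw [if_neg hcur, pvRender_snoc_word]

-- break (separator) then the word starts a fresh line
lemma pvBreak_emit (lines : List (List (List (String × String))))
    (w : List (String × String)) (h : lines ≠ []) :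
    pvEmitWord (pvEmitSep (pvRender lines)) w = pvRender (lines ++ [[w]]) := by
  rw [pvRender_snoc, if_neg h]
  simp [pvEmitLine]

lemma pvPhase2_eq (L : List (List (List (String × String)))) :
    ∀ (li n : Int) (st : List String × List Int × Int), n = li + (L.length : Int) →
    pvPhase2 n li L st = pvRenderTail st L := by
  induction L with
  | nil => intro li n st _; rfl
  | cons l ls ih =>
    intro li n st hn
    simp only [pvPhase2]
    cases ls with
    | nil =>
      have : ¬ li < n - 1 := by simp at hn; omega
      simp only [this, if_false]
      rfl
    | cons l2 ls2 =>
      have hlt : li < n - 1 := by simp at hn; omega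
      simp only [hlt, if_pos]
      rw [ih (li + 1) n _ (by simp at hn ⊢; omega)]
      simp [pvRenderTail, pvEmitLine, pvEmitSep]

lemma pvStepA_inv (mc : Int)
    (st : List (List (List (String × String))) × List (List (String × String)) × Int)
    (w : List (String × String)) (h : st.2.1 = [] → st.2.2 = 0) :
    (pvStepA mc st w).2.1 = [] → (pvStepA mc st w).2.2 = 0 := by
  obtain ⟨lines, cur, clen⟩ := st
  simp only [pvStepA]
  split_ifs <;> simp

lemma pvStep_eq (mc : Int)
    (st : List (List (List (String × String))) × List (List (String × String)) × Int)
    (w : List (String × String)) (h : st.2.1 = [] → st.2.2 = 0) :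
    pvStepB mc (pvMkB st) w = pvMkB (pvStepA mc st w) := by
  obtain ⟨lines, cur, clen⟩ := st
  simp only at h
  by_cases hcur : cur = []
  · subst hcur
    have hclen : clen = 0 := h rfl
    subst hclen
    by_cases hlines : lines = []
    · subst hlines
      -- empty line, nothing pending: no break
      have h1 : pvEmitWord (pvRender ([] ++ if ([] : List (List (String × String))) = [] then [] else [[]])) w =
          pvRender ([] ++ [([] : List (List (String × String))) ++ [w]]) :=
        pvTriple_emit [] [] w (Or.inr rfl)
      have e1 := congrArg Prod.fst h1
      have e2 := congrArg (fun p => p.2.1) h1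
      have e3 := congrArg (fun p => p.2.2) h1
      simp [pvEmitWord] at e1 e2 e3
      rcases hmaj : pvLastIn (pvGetText w) pvMajorBreaks <;>
        rcases hmin : pvLastIn (pvGetText w) pvMinorBreaks <;>
        by_cases hge : mc ≤ (((pvGetText w).length : Int)) + 2 <;>
        simp [pvStepA, pvStepB, pvMkB, hmaj, hmin, hge, e1, e2, e3]
    · -- pending break
      have h1 := pvBreak_emit lines w hlines
      have e1 := congrArg Prod.fst h1
      have e2 := congrArg (fun p => p.2.1) h1
      have e3 := congrArg (fun p => p.2.2) h1
      simp [pvEmitWord, pvEmitSep] at e1 e2 e3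
      rcases hmaj : pvLastIn (pvGetText w) pvMajorBreaks <;>
        rcases hmin : pvLastIn (pvGetText w) pvMinorBreaks <;>
        by_cases hge : mc ≤ (((pvGetText w).length : Int)) + 2 <;>
        simp [pvStepA, pvStepB, pvMkB, hmaj, hmin, hge, hlines, e1, e2, e3]
  · by_cases hov : mc < clen + (((pvGetText w).length : Int))
    · -- overflow break
      have h1 := pvBreak_emit (lines ++ [cur]) w (by simp)
      have e1 := congrArg Prod.fst h1
      have e2 := congrArg (fun p => p.2.1) h1
      have e3 := congrArg (fun p => p.2.2) h1
      simp [pvEmitWord, pvEmitSep] at e1 e2 e3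
      rcases hmaj : pvLastIn (pvGetText w) pvMajorBreaks <;>
        rcases hmin : pvLastIn (pvGetText w) pvMinorBreaks <;>
        by_cases hge : mc ≤ (((pvGetText w).length : Int)) + 2 <;>
        simp [pvStepA, pvStepB, pvMkB, hmaj, hmin, hge, hcur, hov, e1, e2, e3]
    · -- no break
      have h1 := pvTriple_emit lines cur w (Or.inl hcur)
      simp only [if_neg hcur] at h1
      have e1 := congrArg Prod.fst h1
      have e2 := congrArg (fun p => p.2.1) h1
      have e3 := congrArg (fun p => p.2.2) h1
      simp [pvEmitWord] at e1 e2 e3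
      rcases hmaj : pvLastIn (pvGetText w) pvMajorBreaks <;>
        rcases hmin : pvLastIn (pvGetText w) pvMinorBreaks <;>
        by_cases hge : mc ≤ clen + (((pvGetText w).length : Int)) + 2 <;>
        simp [pvStepA, pvStepB, pvMkB, hmaj, hmin, hge, hcur, hov, e1, e2, e3]

lemma pvFold_eq (mc : Int) (ws : List (List (String × String))) :
    ∀ (st : List (List (List (String × String))) × List (List (String × String)) × Int),
    (st.2.1 = [] → st.2.2 = 0) →
    ws.foldl (pvStepB mc) (pvMkB st) = pvMkB (ws.foldl (pvStepA mc) st) := by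
  induction ws with
  | nil => intro st _; rfl
  | cons w ws ih =>
    intro st h
    simp only [List.foldl_cons]
    rw [pvStep_eq mc st w h]
    exact ih _ (pvStepA_inv mc st w h)

-- ===== VERDICT (by name: the statement is the Claim_ definition above) =====
theorem build_display_text_and_map_py_spec : Claim_equal_build_display_text_and_map_py := by
  intro words mc _
  unfold Spec_build_display_text_and_map_py
  simp only [build_display_text_and_map_py, build_display_text_and_map_py_alt]
  rw [show (([], [], 0, 0, false, false) : List String × List Int × Int × Int × Bool × Bool) =
        pvMkB ([], [], 0) from rfl,
      pvFold_eq mc words ([], [], 0) (fun _ => rfl)]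
  by_cases hw : words = []
  · subst hw; rfl
  · rcases hst : words.foldl (pvStepA mc) ([], [], 0) with ⟨lines, cur, clen⟩
    simp only [pvSplitWordsForDisplay, hw, if_false, hst, pvMkB]
    by_cases hcur : cur = []
    · subst hcur
      simp only [ne_eq, not_true_eq_false, if_false, List.append_nil, reduceIte]
      rw [pvPhase2_eq lines 0 (PySem.List.len lines) ([], [], 0) (by simp [PySem.List.len_eq])]
      rfl
    · simp only [ne_eq, hcur, not_false_eq_true, if_pos, if_neg]
      rw [pvPhase2_eq (lines ++ [cur]) 0 (PySem.List.len (lines ++ [cur])) ([], [], 0)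
        (by simp [PySem.List.len_eq])]
      rfl
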